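-- pv_equiv track=rewrite | github.com/zachrjt/V.32_python_modulator | main.py | descramble
-- ===== SOURCE A (Python) =====
-- from collections import deque
--
-- SCRAMBLER_INIT_CODE = [1 for _ in range(24)]   # Initial seed for scrambler/descrambler
--
-- def descramble(inputData):
--     '''
--         Descrambles decoded data using GPC = 1 + x^18 + x^23 per ITU V.32
--     '''
--     encodedInputputData = []
--     shiftRegister = deque(SCRAMBLER_INIT_CODE, maxlen=23)
--
--     for byte in inputData:
--         descrambledByte = 0x00
--
--         for i in range(8):
--             descrambledByte = descrambledByte << 1
--
--             feedback = 0b1 ^ shiftRegister[17] ^ shiftRegister[22]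
--             scrambledBit = ((byte & 0x80)>>7)
--             descrambled = scrambledBit ^ feedback
--
--             descrambledByte += descrambled
--             shiftRegister.appendleft(scrambledBit)
--
--             byte = byte << 1
--
--         encodedInputputData.append(descrambledByte)
--
--     return encodedInputputData
-- ===== SOURCE B (Python) =====
-- def descramble(inputData):
--     '''
--         Descrambles via the closed-form GPC taps: out_bit[n] = 1 ^ bit[n-18] ^ bit[n-23] ^ bit[n]
--         over the flat MSB-first bit stream, out-of-range taps reading the all-ones seed.
--     '''
--     bits = [(byte >> (7 - i)) & 1 for byte in inputData for i in range(8)]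
--     out = [1 ^ (bits[n - 18] if n >= 18 else 1) ^ (bits[n - 23] if n >= 23 else 1) ^ bits[n]
--            for n in range(len(bits))]
--     res = []
--     k = 0
--     while k + 8 <= len(out):
--         v = 0
--         for bit in out[k:k + 8]:
--             v = 2 * v + bit
--         res.append(v)
--         k += 8
--     return res
-- ===== Notes on version B (the rewrite author's own statement) =====
-- stated objective: alternative
-- what changed: B drops A's stateful deque shift register and instead flattens the input into one MSB-first bit stream, computes each output bit by the closed-form tap formula out[n] = 1 ^ bit[n-18] ^ bit[n-23] ^ bit[n] (out-of-range taps read the all-ones seed), and regroups the bits into bytes.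
import Mathlib
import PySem

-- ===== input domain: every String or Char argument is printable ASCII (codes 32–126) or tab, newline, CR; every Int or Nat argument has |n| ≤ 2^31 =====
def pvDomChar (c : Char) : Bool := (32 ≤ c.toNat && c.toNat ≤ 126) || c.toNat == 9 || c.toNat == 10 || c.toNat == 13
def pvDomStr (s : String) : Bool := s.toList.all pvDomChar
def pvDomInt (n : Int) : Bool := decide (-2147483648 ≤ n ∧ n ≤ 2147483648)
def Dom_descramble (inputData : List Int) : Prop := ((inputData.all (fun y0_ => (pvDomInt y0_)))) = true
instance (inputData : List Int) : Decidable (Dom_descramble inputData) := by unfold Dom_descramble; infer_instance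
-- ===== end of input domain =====

-- B replaces A's stateful 23-bit shift register by the closed-form tap formula
-- out[n] = 1 ^ bit[n-18] ^ bit[n-23] ^ bit[n] over the flat MSB-first bit stream (alternative decomposition, same cost).

-- ===== PORT A =====
-- deque(SCRAMBLER_INIT_CODE, maxlen=23) keeps the LAST 23 of the 24 ones, i.e. replicate 23 1;
-- appendleft with maxlen=23 is (bit :: reg).take 23; deque[17]/[22] is getD (register always has 23 entries, so never raises);
-- `byte << 1` / `>> 7` are Int's <<< / >>> (Python-exact per PySem), `&`/`^` are PySem.Int.band/bxor.
def descramble (inputData : List Int) : List Int :=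
  (inputData.foldl
    (fun (st : List Int × List Int) byte =>
      let inner := (List.range 8).foldl
        (fun (s : Int × Int × List Int) _i =>
          let descrambledByte := s.2.1 <<< (1 : Nat)
          let feedback := PySem.Int.bxor (PySem.Int.bxor 1 (s.2.2.getD 17 0)) (s.2.2.getD 22 0)
          let scrambledBit := (PySem.Int.band s.1 0x80) >>> (7 : Nat)
          let descrambled := PySem.Int.bxor scrambledBit feedback
          (s.1 <<< (1 : Nat), descrambledByte + descrambled, (scrambledBit :: s.2.2).take 23))
        (byte, 0, st.2)
      (st.1 ++ [inner.2.1], inner.2.2))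
    ([], List.replicate 23 1)).1

-- ===== PORT B =====
-- Source B's regrouping `while` loop, walking an index k in steps of 8; the slice out[k:k+8]
-- with nonnegative in-range k is exactly (out.drop k).take 8.
def pvRegroupFrom (out : List Int) (k : Nat) : List Int :=
  if h : k + 8 ≤ out.length then
    ((out.drop k).take 8).foldl (fun v bit => 2 * v + bit) 0 :: pvRegroupFrom out (k + 8)
  else []
  termination_by out.length - k
  decreasing_by omega

def descramble_alt (inputData : List Int) : List Int :=
  let bits := inputData.flatMap (fun (byte : Int) => (List.range 8).map (fun (i : Nat) => PySem.Int.band (byte >>> (7 - i)) 1))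
  let out := (List.range bits.length).map (fun n =>
    PySem.Int.bxor (PySem.Int.bxor (PySem.Int.bxor 1 (if 18 ≤ n then bits.getD (n - 18) 0 else 1))
      (if 23 ≤ n then bits.getD (n - 23) 0 else 1)) (bits.getD n 0))
  pvRegroupFrom out 0

-- ===== PRECONDITION & SPEC =====
def Spec_descramble (inputData : List Int) (out : List Int) : Prop := out = descramble_alt inputData
instance (inputData : List Int) (out : List Int) : Decidable (Spec_descramble inputData out) := by unfold Spec_descramble; infer_instance

-- ===== CLAIM (what is proved, stated in full; the proofs are below) =====
def Claim_equal_descramble : Prop := ∀ (inputData : List Int), Dom_descramble inputData → Spec_descramble inputData (descramble inputData)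

-- ===== LEMMAS AND PROOFS =====

-- recursive view of B's regrouping loop: what remains when the first k entries are consumed
def pvRegroup (out : List Int) : List Int :=
  if h : 8 ≤ out.length then
    (out.take 8).foldl (fun v bit => 2 * v + bit) 0 :: pvRegroup (out.drop 8)
  else []
  termination_by out.length
  decreasing_by simp; omega

theorem pv_regroupFrom_eq (out : List Int) : ∀ (k : Nat),
    pvRegroupFrom out k = pvRegroup (out.drop k) := by
  intro k
  induction hn : out.length - k using Nat.strong_induction_on generalizing k with
  | _ n ih =>
    rw [pvRegroupFrom, pvRegroup]
    by_cases hc : k + 8 ≤ out.length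
    · rw [dif_pos hc, dif_pos (by simp; omega)]
      rw [List.drop_drop, ih (out.length - (k + 8)) (by omega) (k + 8) rfl]
    · rw [dif_neg hc, dif_neg (by simp; omega)]

-- the 8 MSB-first bits of a byte, as B extracts them
def pvBits (b : Int) : List Int := (List.range 8).map (fun (i : Nat) => PySem.Int.band (b >>> (7 - i)) 1)

def pvBitsW (m : Nat) (x : Int) : List Int := (List.range m).map (fun (j : Nat) => PySem.Int.band (x >>> (7 - j)) 1)

-- one GPC output bit, in A's expression shape
def pvOut (reg : List Int) (bit : Int) : Int :=
  PySem.Int.bxor bit (PySem.Int.bxor (PySem.Int.bxor 1 (reg.getD 17 0)) (reg.getD 22 0))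

-- A's shift register run over a bit stream
def pvCore (reg : List Int) : List Int → List Int
  | [] => []
  | b :: rest => pvOut reg b :: pvCore ((b :: reg).take 23) rest

def pvRegAfter (reg : List Int) (bs : List Int) : List Int := bs.foldl (fun r b => (b :: r).take 23) reg

def pvByteOf (bs : List Int) : Int := bs.foldl (fun a o => (a <<< (1 : Nat)) + o) 0

theorem pv_nat_and_128 (n : Nat) : n &&& 128 = 128 * (n / 128 % 2) := by
  have h := Nat.and_two_pow n 7
  norm_num at h
  rw [h, Nat.testBit_eq_decide_div_mod_eq]
  norm_num
  rcases Nat.mod_two_eq_zero_or_one (n / 128) with h2 | h2 <;> simp [h2]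

theorem pv_band_128 (y : Int) : PySem.Int.band y 128 = 128 * (y / 128 % 2) := by
  unfold PySem.Int.band
  simp only [show ((0:Int) ≤ 128) = True from by simp, if_true]
  split_ifs with h1
  · rw [show ((128:Int).toNat) = 128 from rfl, pv_nat_and_128]
    obtain ⟨m, rfl⟩ := Int.eq_ofNat_of_zero_le h1
    push_cast
    omega
  · rw [show ((128:Int).toNat) = 128 from rfl, Nat.and_comm, pv_nat_and_128]
    obtain ⟨m, hm⟩ := Int.eq_ofNat_of_zero_le (show (0:Int) ≤ -y - 1 by omega)
    have hy : y = -(m : Int) - 1 := by omega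
    rw [hm]
    subst hy
    omega

theorem pv_bit_extract (x : Int) (i k : Nat) (h : i + k = 7) :
    (PySem.Int.band (x <<< i) 128) >>> (7 : Nat) = PySem.Int.band (x >>> k) 1 := by
  rw [PySem.Int.band_one, PySem.Int.mod_eq_emod_of_pos (by norm_num), pv_band_128,
    Int.shiftRight_eq_div_pow, Int.shiftRight_eq_div_pow, Int.shiftLeft_eq]
  norm_num
  have h2 : (128:Int) = 2 ^ i * 2 ^ k := by rw [← pow_add, h]; norm_num
  rw [h2, mul_comm x, Int.mul_ediv_mul_of_pos _ _ (by positivity)]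

theorem pv_bit_extract0 (x : Int) :
    (PySem.Int.band x 128) >>> (7 : Nat) = PySem.Int.band (x >>> (7 : Nat)) 1 := by
  have h := pv_bit_extract x 0 7 rfl
  rwa [Int.shiftLeft_zero] at h

theorem pv_shift_shift (x : Int) (k : Nat) : (x <<< (1:Nat)) >>> (k + 1) = x >>> k := by
  rw [Int.shiftLeft_eq, Int.shiftRight_eq_div_pow, Int.shiftRight_eq_div_pow]
  norm_num
  rw [pow_succ, mul_comm ((2:Int)^k) 2, mul_comm x 2, Int.mul_ediv_mul_of_pos _ _ (by norm_num)]

theorem pv_innerG (m : Nat) (hm : m ≤ 8) (l : List Nat) (hl : l.length = m) :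
    ∀ (x db : Int) (reg : List Int),
    l.foldl
        (fun (s : Int × Int × List Int) _i =>
          let descrambledByte := s.2.1 <<< (1 : Nat)
          let feedback := PySem.Int.bxor (PySem.Int.bxor 1 (s.2.2.getD 17 0)) (s.2.2.getD 22 0)
          let scrambledBit := (PySem.Int.band s.1 0x80) >>> (7 : Nat)
          let descrambled := PySem.Int.bxor scrambledBit feedback
          (s.1 <<< (1 : Nat), descrambledByte + descrambled, (scrambledBit :: s.2.2).take 23))
        (x, db, reg)
      = (x <<< m, (pvCore reg (pvBitsW m x)).foldl (fun (a o : Int) => (a <<< (1:Nat)) + o) db,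
          pvRegAfter reg (pvBitsW m x)) := by
  induction m generalizing l with
  | zero =>
    intro x db reg
    rw [List.length_eq_zero_iff] at hl
    subst hl
    simp [pvBitsW, pvCore, pvRegAfter, List.range_zero]
  | succ m ih =>
    rcases l with _ | ⟨a, l⟩
    · simp at hl
    intro x db reg
    have hbits : pvBitsW (m + 1) x
        = PySem.Int.band (x >>> (7:Nat)) 1 :: pvBitsW m (x <<< (1:Nat)) := by
      unfold pvBitsW
      rw [List.range_succ_eq_map, List.map_cons, List.map_map]
      congr 1
      refine List.map_congr_left fun j hj => ?_
      simp only [Function.comp_apply]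
      have hj' : j < m := List.mem_range.mp hj
      have h7 : 7 - (j + 1) + 1 = 7 - j := by omega
      rw [← h7, pv_shift_shift]
    rw [List.foldl_cons]
    rw [ih (by omega) l (by simpa using hl) (x <<< (1:Nat)) _ _]
    rw [hbits]
    simp only [pvCore, pvRegAfter, List.foldl_cons, pv_bit_extract0]
    have hx : x <<< (1:Nat) <<< m = x <<< (m + 1) := by rw [← Int.shiftLeft_add, Nat.add_comm]
    rw [hx]
    simp only [pvOut]

-- A's inner 8-step loop, characterised
theorem pv_inner (b : Int) (reg : List Int) :
    (List.range 8).foldl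
        (fun (s : Int × Int × List Int) _i =>
          let descrambledByte := s.2.1 <<< (1 : Nat)
          let feedback := PySem.Int.bxor (PySem.Int.bxor 1 (s.2.2.getD 17 0)) (s.2.2.getD 22 0)
          let scrambledBit := (PySem.Int.band s.1 0x80) >>> (7 : Nat)
          let descrambled := PySem.Int.bxor scrambledBit feedback
          (s.1 <<< (1 : Nat), descrambledByte + descrambled, (scrambledBit :: s.2.2).take 23))
        (b, 0, reg)
      = (b <<< (8 : Nat), pvByteOf (pvCore reg (pvBits b)), pvRegAfter reg (pvBits b)) := by
  have h := pv_innerG 8 le_rfl (List.range 8) (by simp) b 0 reg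
  exact h

theorem pv_core_append (xs ys : List Int) : ∀ reg,
    pvCore reg (xs ++ ys) = pvCore reg xs ++ pvCore (pvRegAfter reg xs) ys := by
  induction xs with
  | nil => intro reg; simp [pvCore, pvRegAfter]
  | cons x xs ih => intro reg; simp [pvCore, pvRegAfter, ih, List.foldl_cons]

theorem pv_core_length (bs : List Int) : ∀ reg, (pvCore reg bs).length = bs.length := by
  induction bs with
  | nil => intro reg; simp [pvCore]
  | cons b bs ih => intro reg; simp [pvCore, ih]

theorem pv_regroup_cons8 (bs rest : List Int) (h : bs.length = 8) :
    pvRegroup (bs ++ rest) = pvByteOf bs :: pvRegroup rest := by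
  have hb : pvByteOf bs = bs.foldl (fun (v bit : Int) => 2 * v + bit) 0 := by
    unfold pvByteOf
    congr 1
    funext a o
    rw [Int.shiftLeft_eq]
    ring
  rw [pvRegroup]
  rw [dif_pos (by simp [List.length_append, h])]
  rw [show (8:Nat) = bs.length from h.symm, List.take_left, List.drop_left, hb]

-- the register after reading p bits of the stream, and its taps
theorem pv_regGet (bits : List Int) (p : Nat) (hp : p ≤ bits.length) (j : Nat) (hj : j < 23) :
    (((bits.take p).reverse ++ List.replicate 23 1).take 23).getD j 0
      = if j + 1 ≤ p then bits.getD (p - 1 - j) 0 else 1 := by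
  have hlrev : (bits.take p).reverse.length = p := by
    simp [List.length_take]
    omega
  rw [List.getD_eq_getElem?_getD, List.getElem?_take_of_lt hj]
  by_cases hc : j + 1 ≤ p
  · rw [List.getElem?_append_left (by omega), List.getElem?_reverse (by simp [List.length_take]; omega), if_pos hc]
    rw [List.length_take, List.getElem?_take_of_lt (by omega), List.getD_eq_getElem?_getD]
    congr 2
    omega
  · rw [List.getElem?_append_right (by omega), if_neg hc, hlrev,
      List.getElem?_replicate_of_lt (by omega)]
    rfl

theorem pv_regStep (bits : List Int) (p : Nat) (hp : p < bits.length) :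
    (bits[p] :: (((bits.take p).reverse ++ List.replicate 23 1).take 23)).take 23
      = ((bits.take (p + 1)).reverse ++ List.replicate 23 1).take 23 := by
  have h1 : bits.take (p + 1) = bits.take p ++ [bits[p]] := by
    rw [List.take_add_one, List.getElem?_eq_getElem hp]
    rfl
  rw [show (23:Nat) = 22 + 1 from rfl, List.take_succ_cons, List.take_take]
  rw [h1, List.reverse_append, List.reverse_singleton, List.singleton_append,
    List.cons_append, List.take_succ_cons]
  norm_num

-- A's register run equals B's closed-form tap map
theorem pv_coreEq (bits : List Int) : ∀ (n p : Nat), p + n = bits.length →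
    pvCore (((bits.take p).reverse ++ List.replicate 23 1).take 23) (bits.drop p)
      = (List.range' p n).map (fun m =>
          PySem.Int.bxor (PySem.Int.bxor (PySem.Int.bxor 1 (if 18 ≤ m then bits.getD (m - 18) 0 else 1))
            (if 23 ≤ m then bits.getD (m - 23) 0 else 1)) (bits.getD m 0)) := by
  intro n
  induction n with
  | zero =>
    intro p hp
    rw [List.drop_eq_nil_of_le (by omega)]
    simp [pvCore]
  | succ n ih =>
    intro p hp
    have hplt : p < bits.length := by omega
    rw [List.drop_eq_getElem_cons hplt]
    show pvOut _ _ :: pvCore _ _ = _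
    rw [pv_regStep bits p hplt, ih (p + 1) (by omega), List.range'_succ, List.map_cons]
    congr 1
    unfold pvOut
    rw [pv_regGet bits p (by omega) 17 (by norm_num), pv_regGet bits p (by omega) 22 (by norm_num)]
    rw [show p - 1 - 17 = p - 18 from by omega, show p - 1 - 22 = p - 23 from by omega]
    norm_num
    rw [PySem.Int.bxor_comm, List.getElem?_eq_getElem hplt]
    rfl

-- A's outer loop, characterised
theorem pv_outer (l : List Int) : ∀ (acc : List Int) (reg : List Int),
    (l.foldl
      (fun (st : List Int × List Int) byte =>
        let inner := (List.range 8).foldl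
          (fun (s : Int × Int × List Int) _i =>
            let descrambledByte := s.2.1 <<< (1 : Nat)
            let feedback := PySem.Int.bxor (PySem.Int.bxor 1 (s.2.2.getD 17 0)) (s.2.2.getD 22 0)
            let scrambledBit := (PySem.Int.band s.1 0x80) >>> (7 : Nat)
            let descrambled := PySem.Int.bxor scrambledBit feedback
            (s.1 <<< (1 : Nat), descrambledByte + descrambled, (scrambledBit :: s.2.2).take 23))
          (byte, 0, st.2)
        (st.1 ++ [inner.2.1], inner.2.2))
      (acc, reg)).1 = acc ++ pvRegroup (pvCore reg (l.flatMap pvBits)) := by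
  induction l with
  | nil =>
    intro acc reg
    simp only [List.foldl_nil, List.flatMap_nil, pvCore]
    rw [pvRegroup]
    simp
  | cons b l ih =>
    intro acc reg
    have hstep := pv_inner b reg
    simp only [List.foldl_cons, hstep]
    rw [ih]
    rw [List.flatMap_cons, pv_core_append,
      pv_regroup_cons8 _ _ (by rw [pv_core_length]; simp [pvBits])]
    simp [List.append_assoc]

-- ===== VERDICT (by name: the statement is the Claim_ definition above) =====
theorem descramble_spec : Claim_equal_descramble := by
  unfold Claim_equal_descramble
  intro l _
  unfold Spec_descramble descramble descramble_alt
  rw [pv_outer l [] (List.replicate 23 1)]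
  have h := pv_coreEq (l.flatMap pvBits) (l.flatMap pvBits).length 0 (by simp)
  simp only [List.take_zero, List.reverse_nil, List.nil_append, List.take_replicate,
    List.drop_zero, Nat.min_self] at h
  rw [List.nil_append, h, ← List.range_eq_range']
  show _ = pvRegroupFrom _ 0
  rw [pv_regroupFrom_eq _ 0, List.drop_zero]
  rfl
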